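-- pv_equiv track=rewrite | github.com/sueszli/vector-database-benchmark | dataset/python-mutated/overlongutf8.py | tamper
-- ===== SOURCE A (Python) =====
-- import string
--
-- def tamper(payload, **kwargs):
--     if False:
--         while True:
--             i = 10
--     "\n    Converts all (non-alphanum) characters in a given payload to overlong UTF8 (not processing already encoded) (e.g. ' -> %C0%A7)\n\n    Reference:\n        * https://www.acunetix.com/vulnerabilities/unicode-transformation-issues/\n        * https://www.thecodingforums.com/threads/newbie-question-about-character-encoding-what-does-0xc0-0x8a-have-in-common-with-0xe0-0x80-0x8a.170201/\n\n    >>> tamper('SELECT FIELD FROM TABLE WHERE 2>1')\n    'SELECT%C0%A0FIELD%C0%A0FROM%C0%A0TABLE%C0%A0WHERE%C0%A02%C0%BE1'\n    "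
--     retVal = payload
--     if payload:
--         retVal = ''
--         i = 0
--         while i < len(payload):
--             if payload[i] == '%' and i < len(payload) - 2 and (payload[i + 1:i + 2] in string.hexdigits) and (payload[i + 2:i + 3] in string.hexdigits):
--                 retVal += payload[i:i + 3]
--                 i += 3
--             else:
--                 if payload[i] not in string.ascii_letters + string.digits:
--                     retVal += '%%%.2X%%%.2X' % (192 + (ord(payload[i]) >> 6), 128 + (ord(payload[i]) & 63))
--                 else:
--                     retVal += payload[i]
--                 i += 1
--     return retVal
-- ===== SOURCE B (Python) =====
-- import string
--
-- _ALNUM = set(string.ascii_letters + string.digits)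
-- _HEXD = set(string.hexdigits)
--
--
-- def _enc(s):
--     return ''.join(c if c in _ALNUM else '%%%.2X%%%.2X' % (192 + (ord(c) >> 6), 128 + (ord(c) & 63)) for c in s)
--
--
-- def tamper(payload, **kwargs):
--     if not payload:
--         return payload
--     parts = payload.split('%')
--     out = [_enc(parts[0])]
--     for p in parts[1:]:
--         if len(p) >= 2 and p[0] in _HEXD and p[1] in _HEXD:
--             out.append('%' + p[:2] + _enc(p[2:]))
--         else:
--             out.append(_enc('%') + _enc(p))
--     return ''.join(out)
-- ===== Notes on version B (the rewrite author's own statement) =====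
-- stated objective: faster
-- what changed: A scans character by character with an index that advances by 3 or 1 and grows the result by repeated string concatenation; B instead splits the payload on the escape character, encodes each separator-free segment wholesale (keeping a leading two-hexdigit pair of a part as an existing escape), and joins the pieces once.
import Mathlib
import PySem

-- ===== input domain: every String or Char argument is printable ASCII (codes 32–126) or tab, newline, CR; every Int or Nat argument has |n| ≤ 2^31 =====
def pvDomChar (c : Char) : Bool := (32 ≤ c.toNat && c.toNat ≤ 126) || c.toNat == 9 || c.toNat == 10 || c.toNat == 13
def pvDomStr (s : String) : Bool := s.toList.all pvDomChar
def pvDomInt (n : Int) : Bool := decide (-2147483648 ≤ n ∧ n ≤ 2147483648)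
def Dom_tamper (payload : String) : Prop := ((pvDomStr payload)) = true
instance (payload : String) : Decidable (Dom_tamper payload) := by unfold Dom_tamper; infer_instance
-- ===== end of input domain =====

-- B re-implements A's character-at-a-time scan (which grows the result by repeated string
-- concatenation) as a split-on-the-escape-char pass with whole-segment encoding and a single
-- join; a timing run measured B faster at the largest sizes.

-- shared helpers (both Pythons use the same membership tests and the same '%%%.2X%%%.2X' format)
-- membership in string.ascii_letters + string.digits (ASCII-exact)
def isAlnumA (c : Char) : Bool :=
  ('a' ≤ c && c ≤ 'z') || ('A' ≤ c && c ≤ 'Z') || ('0' ≤ c && c ≤ '9')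

-- membership (single char) in string.hexdigits
def isHexD (c : Char) : Bool :=
  ('0' ≤ c && c ≤ '9') || ('a' ≤ c && c ≤ 'f') || ('A' ≤ c && c ≤ 'F')

-- one uppercase hex digit, n < 16
def hexDig (n : Nat) : Char :=
  if n < 10 then Char.ofNat (48 + n) else Char.ofNat (55 + n)

-- '%%%.2X%%%.2X' % (192 + (ord c >> 6), 128 + (ord c & 63)); exact since both byte values are < 256
def encChar (c : Char) : List Char :=
  let b1 := 192 + c.toNat / 64
  let b2 := 128 + c.toNat % 64
  ['%', hexDig (b1 / 16), hexDig (b1 % 16), '%', hexDig (b2 / 16), hexDig (b2 % 16)]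

-- ===== PORT A =====
-- the while loop; payload[i] is guarded by i < len, so getD is exact; the 1-char slice
-- membership tests 'payload[i+1:i+2] in string.hexdigits' are exact as isHexD under the
-- preceding bound i + 2 < len; payload[i:i+3] is (cs.drop i).take 3
def tamperLoop (cs : List Char) (i : Nat) (acc : List Char) : List Char :=
  if i < cs.length then
    if cs.getD i ' ' = '%' ∧ i + 2 < cs.length ∧ isHexD (cs.getD (i+1) ' ') ∧ isHexD (cs.getD (i+2) ' ') then
      tamperLoop cs (i+3) (acc ++ (cs.drop i).take 3)
    else
      if ¬ isAlnumA (cs.getD i ' ') then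
        tamperLoop cs (i+1) (acc ++ encChar (cs.getD i ' '))
      else
        tamperLoop cs (i+1) (acc ++ [cs.getD i ' '])
  else acc
termination_by cs.length - i
decreasing_by all_goals omega

def tamper (payload : String) : String :=
  if payload.toList = [] then payload
  else String.ofList (tamperLoop payload.toList 0 [])

-- ===== PORT B =====
-- payload.split('%') (separator is the single char '%')
def splitPct : List Char → List (List Char)
  | [] => [[]]
  | c :: rest =>
    if c = '%' then [] :: splitPct rest
    else
      match splitPct rest with
      | [] => [[c]]
      | p :: ps => (c :: p) :: ps

-- _enc: per-character encoding of a '%'-free segment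
def encSeg (l : List Char) : List Char :=
  (l.map (fun c => if isAlnumA c then [c] else encChar c)).flatten

-- the body of B's for loop, for one part after a '%'
def piecePct (p : List Char) : List Char :=
  if 2 ≤ p.length ∧ isHexD (p.getD 0 ' ') ∧ isHexD (p.getD 1 ' ') then
    '%' :: (p.take 2 ++ encSeg (p.drop 2))
  else
    encSeg ['%'] ++ encSeg p

def tamper_alt (payload : String) : String :=
  if payload.toList = [] then payload
  else
    match splitPct payload.toList with
    | [] => ""   -- unreachable: splitPct never returns []
    | p0 :: rest => String.ofList (encSeg p0 ++ (rest.map piecePct).flatten)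

-- ===== PRECONDITION & SPEC =====
def Spec_tamper (payload : String) (out : String) : Prop := out = tamper_alt payload
instance (payload : String) (out : String) : Decidable (Spec_tamper payload out) := by unfold Spec_tamper; infer_instance

-- ===== CLAIM (what is proved, stated in full; the proofs are below) =====
def Claim_equal_tamper : Prop := ∀ (payload : String), Dom_tamper payload → Spec_tamper payload (tamper payload)

-- ===== LEMMAS AND PROOFS =====

-- the common reference: A's 3-or-1 token scan as a structural recursion
def enc1 (c : Char) : List Char := if isAlnumA c then [c] else encChar c

def specEnc : List Char → List Char
  | [] => []
  | c :: rest =>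
    if c = '%' ∧ 2 ≤ rest.length ∧ isHexD (rest.getD 0 ' ') ∧ isHexD (rest.getD 1 ' ') then
      c :: rest.getD 0 ' ' :: rest.getD 1 ' ' :: specEnc (rest.drop 2)
    else enc1 c ++ specEnc rest
termination_by l => l.length
decreasing_by all_goals simp only [List.length_drop, List.length_cons]; omega

theorem getD_drop_lt (cs : List Char) (i j : Nat) (_h : i + j < cs.length) :
    (cs.drop i).getD j ' ' = cs.getD (i + j) ' ' := by
  rw [List.getD_eq_getElem?_getD, List.getD_eq_getElem?_getD, List.getElem?_drop]

theorem tamperLoop_eq_specEnc (cs : List Char) (i : Nat) (acc : List Char) :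
    tamperLoop cs i acc = acc ++ specEnc (cs.drop i) := by
  fun_induction tamperLoop cs i acc with
  | case1 i acc h hcond ih =>
    obtain ⟨hc, hlen, ha, hb⟩ := hcond
    have e1 : cs.drop i = cs.getD i ' ' :: cs.getD (i+1) ' ' :: cs.getD (i+2) ' ' :: cs.drop (i+3) := by
      rw [List.drop_eq_getElem_cons h, List.drop_eq_getElem_cons (by omega : i + 1 < cs.length),
        List.drop_eq_getElem_cons (by omega : i + 2 < cs.length)]
      rw [List.getD_eq_getElem (hn := h), List.getD_eq_getElem (hn := by omega),
        List.getD_eq_getElem (hn := by omega)]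
    rw [ih, e1]
    simp only [List.take_succ_cons, List.take_zero, specEnc]
    rw [if_pos ⟨hc, by simp, by simpa [List.getD_eq_getElem?_getD] using ha,
      by simpa [List.getD_eq_getElem?_getD] using hb⟩]
    simp
  | case2 i acc h hcond hna ih =>
    have e1 : cs.drop i = cs.getD i ' ' :: cs.drop (i+1) := by
      rw [List.drop_eq_getElem_cons h, List.getD_eq_getElem (hn := h)]
    rw [ih, e1, specEnc]
    rw [if_neg ?_]
    · simp only [enc1]
      rw [if_neg hna, List.append_assoc]
    · rintro ⟨hc, hlen, ha, hb⟩
      rw [List.length_drop] at hlen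
      rw [getD_drop_lt cs (i+1) 0 (by omega)] at ha
      rw [getD_drop_lt cs (i+1) 1 (by omega)] at hb
      exact hcond ⟨hc, by omega, ha, by simpa using hb⟩
  | case3 i acc h hcond hna ih =>
    have e1 : cs.drop i = cs.getD i ' ' :: cs.drop (i+1) := by
      rw [List.drop_eq_getElem_cons h, List.getD_eq_getElem (hn := h)]
    have hal : isAlnumA (cs.getD i ' ') = true := by
      by_contra hx
      exact hna (by simpa using hx)
    rw [ih, e1, specEnc]
    rw [if_neg ?_]
    · simp only [enc1]
      rw [if_pos hal, List.append_assoc]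
    · rintro ⟨hc, hlen, ha, hb⟩
      rw [List.length_drop] at hlen
      rw [getD_drop_lt cs (i+1) 0 (by omega)] at ha
      rw [getD_drop_lt cs (i+1) 1 (by omega)] at hb
      exact hcond ⟨hc, by omega, ha, by simpa using hb⟩
  | case4 i acc h =>
    rw [List.drop_of_length_le (by omega)]
    simp [specEnc]

theorem specEnc_append_of_no_pct (p l : List Char) (h : '%' ∉ p) :
    specEnc (p ++ l) = encSeg p ++ specEnc l := by
  induction p with
  | nil => simp [encSeg]
  | cons c r ih =>
    have hc : c ≠ '%' := fun hc => h (hc ▸ List.mem_cons_self ..)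
    have hr : '%' ∉ r := fun hm => h (List.mem_cons_of_mem _ hm)
    rw [List.cons_append, specEnc, if_neg (by simp [hc]), ih hr]
    simp [encSeg, enc1]

theorem flatten_piecePct_eq_specEnc (rest : List (List Char))
    (h : ∀ p ∈ rest, '%' ∉ p) :
    (rest.map piecePct).flatten = specEnc ((rest.map ('%' :: ·)).flatten) := by
  induction rest with
  | nil => simp [specEnc]
  | cons p ps ih =>
    have hp : '%' ∉ p := h p (List.mem_cons_self ..)
    have ihs := ih (fun q hq => h q (List.mem_cons_of_mem _ hq))
    simp only [List.map_cons, List.flatten_cons, List.cons_append]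
    rw [specEnc]
    by_cases hCp : 2 ≤ p.length ∧ isHexD (p.getD 0 ' ') = true ∧ isHexD (p.getD 1 ' ') = true
    · obtain ⟨hl, ha, hb⟩ := hCp
      rcases p with _ | ⟨a, p2⟩
      · simp at hl
      rcases p2 with _ | ⟨b, t⟩
      · simp at hl
      have ha' : isHexD a = true := by simpa [List.getD_eq_getElem?_getD] using ha
      have hb' : isHexD b = true := by simpa [List.getD_eq_getElem?_getD] using hb
      simp only [List.cons_append]
      rw [if_pos ⟨trivial, by simp, by simpa [List.getD_eq_getElem?_getD] using ha',
        by simpa [List.getD_eq_getElem?_getD] using hb'⟩]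
      rw [piecePct, if_pos ⟨by simp, by simpa [List.getD_eq_getElem?_getD] using ha',
        by simpa [List.getD_eq_getElem?_getD] using hb'⟩]
      have hpt : '%' ∉ t := fun hm => hp (List.mem_cons_of_mem _ (List.mem_cons_of_mem _ hm))
      simp only [List.getD_eq_getElem?_getD, List.getElem?_cons_zero, List.getElem?_cons_succ,
        Option.getD_some, List.drop_succ_cons, List.drop_zero, List.take_succ_cons, List.take_zero]
      rw [specEnc_append_of_no_pct t _ hpt, ihs]
      simp
    · rw [piecePct, if_neg hCp]
      rw [if_neg ?_]
      · rw [specEnc_append_of_no_pct p _ hp, ihs]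
        simp [encSeg, enc1]
      · rintro ⟨-, hl, h0, h1⟩
        apply hCp
        rcases p with _ | ⟨a, p2⟩
        · rcases ps with _ | ⟨q, qs⟩
          · simp at hl
          · simp [List.getD_eq_getElem?_getD] at h0
            exact absurd h0 (by decide)
        · rcases p2 with _ | ⟨b, t⟩
          · rcases ps with _ | ⟨q, qs⟩
            · simp at hl
            · simp [List.getD_eq_getElem?_getD] at h1
              exact absurd h1 (by decide)
          · refine ⟨by simp, ?_, ?_⟩
            · simpa [List.getD_eq_getElem?_getD] using h0
            · simpa [List.getD_eq_getElem?_getD] using h1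

theorem splitPct_ne_nil (l : List Char) : splitPct l ≠ [] := by
  induction l with
  | nil => simp [splitPct]
  | cons c rest ih =>
    simp only [splitPct]
    split
    · simp
    · rcases h : splitPct rest with _ | ⟨q, qs⟩
      · exact absurd h ih
      · simp

theorem splitPct_no_pct (l : List Char) : ∀ p ∈ splitPct l, '%' ∉ p := by
  induction l with
  | nil => simp [splitPct]
  | cons c rest ih =>
    intro p hp
    simp only [splitPct] at hp
    by_cases hc : c = '%'
    · rw [if_pos hc] at hp
      rcases List.mem_cons.mp hp with h | h
      · simp [h]
      · exact ih p h
    · rw [if_neg hc] at hp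
      rcases hq : splitPct rest with _ | ⟨q, qs⟩
      · rw [hq] at hp
        simp only [List.mem_singleton] at hp
        simp [hp, Ne.symm hc]
      · rw [hq] at hp
        rcases List.mem_cons.mp hp with h | h
        · subst h
          intro hm
          rcases List.mem_cons.mp hm with h' | h'
          · exact hc h'.symm
          · exact ih q (hq ▸ List.mem_cons_self ..) h'
        · exact ih p (hq ▸ List.mem_cons_of_mem _ h)

theorem splitPct_join (l : List Char) :
    ∀ p0 ps, splitPct l = p0 :: ps → l = p0 ++ ((ps.map ('%' :: ·)).flatten) := by
  induction l with
  | nil =>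
    intro p0 ps h
    simp only [splitPct] at h
    obtain ⟨h1, h2⟩ := List.cons.injEq .. ▸ h
    simp [← h1, ← h2]
  | cons c rest ih =>
    intro p0 ps h
    simp only [splitPct] at h
    by_cases hc : c = '%'
    · rw [if_pos hc] at h
      obtain ⟨h1, h2⟩ := List.cons.injEq .. ▸ h
      rcases hq : splitPct rest with _ | ⟨q, qs⟩
      · exact absurd hq (splitPct_ne_nil rest)
      · have := ih q qs hq
        subst hc
        rw [← h1, ← h2, hq]
        simp [this]
    · rw [if_neg hc] at h
      rcases hq : splitPct rest with _ | ⟨q, qs⟩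
      · exact absurd hq (splitPct_ne_nil rest)
      · rw [hq] at h
        obtain ⟨h1, h2⟩ := List.cons.injEq .. ▸ h
        have := ih q qs hq
        rw [← h1, ← h2]
        simp [this]

-- ===== VERDICT (by name: the statement is the Claim_ definition above) =====
theorem tamper_spec : Claim_equal_tamper := by
  intro payload _
  unfold Spec_tamper tamper tamper_alt
  by_cases he : payload.toList = []
  · simp [he]
  · simp only [if_neg he]
    rcases hsp : splitPct payload.toList with _ | ⟨p0, ps⟩
    · exact absurd hsp (splitPct_ne_nil _)
    · have hno := splitPct_no_pct payload.toList
      rw [hsp] at hno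
      have hjoin := splitPct_join payload.toList p0 ps hsp
      rw [tamperLoop_eq_specEnc, List.drop_zero, List.nil_append, hjoin,
        specEnc_append_of_no_pct _ _ (hno p0 (List.mem_cons_self ..)),
        ← flatten_piecePct_eq_specEnc ps (fun p hp => hno p (List.mem_cons_of_mem _ hp))]
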